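-- pv_equiv track=rewrite | github.com/VedantProject/AI-BASED-SYNTAX-ERROR-CLASSIFIER | self_heal/healer.py | _count_unmatched
-- ===== SOURCE A (Python) =====
-- def _count_unmatched(line: str, open_ch: str, close_ch: str) -> int:
--     """
--     Return net unmatched opens in *line* (positive = more opens than closes).
--     Ignores characters inside string literals (simple heuristic).
--     """
--     in_str, str_ch = False, ''
--     depth = 0
--     for ch in line:
--         if in_str:
--             if ch == str_ch:
--                 in_str = False
--         elif ch in ('"', "'"):
--             in_str, str_ch = True, ch
--         elif ch == open_ch:
--             depth += 1
--         elif ch == close_ch: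
--             depth -= 1
--     return depth
-- ===== SOURCE B (Python) =====
-- def _count_unmatched(line: str, open_ch: str, close_ch: str) -> int:
--     """Net unmatched opens: strip string literals first, then count brackets."""
--     code = []
--     quote = None
--     for ch in line:
--         if quote is not None:
--             if ch == quote:
--                 quote = None
--         elif ch in ('"', "'"):
--             quote = ch
--         else:
--             code.append(ch)
--     return code.count(open_ch) - code.count(close_ch)
-- ===== Notes on version B (the rewrite author's own statement) =====
-- stated objective: alternative
-- what changed: B separates the work into string-literal stripping (one pass building the non-string characters) followed by two list.count calls, instead of A's single scan maintaining a depth counter.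
-- outside the precondition, e.g. on _count_unmatched('((', '(', '('): A returns 2, B returns 0
import Mathlib
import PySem

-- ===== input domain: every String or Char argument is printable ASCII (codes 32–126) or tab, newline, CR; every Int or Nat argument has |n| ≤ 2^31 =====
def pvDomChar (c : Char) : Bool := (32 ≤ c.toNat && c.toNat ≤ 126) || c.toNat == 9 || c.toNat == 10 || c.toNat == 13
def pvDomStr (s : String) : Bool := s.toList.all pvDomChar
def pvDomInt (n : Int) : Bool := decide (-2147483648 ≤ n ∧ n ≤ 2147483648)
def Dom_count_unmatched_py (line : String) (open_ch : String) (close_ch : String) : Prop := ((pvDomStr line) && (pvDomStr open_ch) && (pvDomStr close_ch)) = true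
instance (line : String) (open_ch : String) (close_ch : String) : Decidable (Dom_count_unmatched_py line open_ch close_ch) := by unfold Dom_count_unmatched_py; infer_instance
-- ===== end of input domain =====

-- B strips string literals in one pass, then counts brackets with two list counts ("alternative" decomposition, same cost).

-- ===== PORT A =====
-- one loop step of A: state = (in_str, str_ch, depth)
def cuStepA (open_ch close_ch : String) (st : Bool × String × Int) (c : Char) : Bool × String × Int :=
  let s := String.ofList [c]
  if st.1 then
    if s == st.2.1 then (false, st.2.1, st.2.2) else st
  else if s == "\"" || s == "'" then (true, s, st.2.2)
  else if s == open_ch then (st.1, st.2.1, st.2.2 + 1)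
  else if s == close_ch then (st.1, st.2.1, st.2.2 - 1)
  else st

def count_unmatched_py (line : String) (open_ch : String) (close_ch : String) : Int :=
  (line.toList.foldl (cuStepA open_ch close_ch) (false, "", 0)).2.2

-- ===== PORT B =====
-- B's stripping loop: returns the characters (as 1-char strings) outside string literals
def cuStrip : List Char → Option String → List String
  | [], _ => []
  | c :: rest, some q =>
      if String.ofList [c] == q then cuStrip rest none else cuStrip rest (some q)
  | c :: rest, none =>
      let s := String.ofList [c]
      if s == "\"" || s == "'" then cuStrip rest (some s)
      else s :: cuStrip rest none

def count_unmatched_py_alt (line : String) (open_ch : String) (close_ch : String) : Int :=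
  let code := cuStrip line.toList none
  (code.count open_ch : Int) - (code.count close_ch : Int)

-- ===== PRECONDITION & SPEC =====
-- Pre_ excludes the degenerate calls with open_ch = close_ch, on which A's elif ordering
-- arbitrarily counts every such character as an open while B's two counts cancel; neither
-- value is specified for that corner.
def Pre_count_unmatched_py (line : String) (open_ch : String) (close_ch : String) : Prop :=
  open_ch ≠ close_ch
instance (line : String) (open_ch : String) (close_ch : String) : Decidable (Pre_count_unmatched_py line open_ch close_ch) := by unfold Pre_count_unmatched_py; infer_instance

def pvWitness_count_unmatched_py : String × String × String := ("a(b(\"c)\")", "(", ")")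

def Spec_count_unmatched_py (line : String) (open_ch : String) (close_ch : String) (out : Int) : Prop := out = count_unmatched_py_alt line open_ch close_ch
instance (line : String) (open_ch : String) (close_ch : String) (out : Int) : Decidable (Spec_count_unmatched_py line open_ch close_ch out) := by unfold Spec_count_unmatched_py; infer_instance

-- ===== CLAIM (what is proved, stated in full; the proofs are below) =====
def Claim_equal_count_unmatched_py : Prop := ∀ (line : String) (open_ch : String) (close_ch : String), Dom_count_unmatched_py line open_ch close_ch → Pre_count_unmatched_py line open_ch close_ch → Spec_count_unmatched_py line open_ch close_ch (count_unmatched_py line open_ch close_ch)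

-- ===== LEMMAS AND PROOFS =====

-- loop invariant: A's final depth = initial depth + (opens − closes) in B's stripped remainder
lemma cu_loop_eq (open_ch close_ch : String) (h : open_ch ≠ close_ch) :
    ∀ (cs : List Char) (b : Bool) (s : String) (d : Int),
      (cs.foldl (cuStepA open_ch close_ch) (b, s, d)).2.2
        = d + ((cuStrip cs (if b then some s else none)).count open_ch : Int)
            - ((cuStrip cs (if b then some s else none)).count close_ch : Int) := by
  intro cs
  induction cs with
  | nil => intro b s d; cases b <;> simp [cuStrip]
  | cons c rest ih =>
    intro b s d
    rw [List.foldl_cons]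
    cases b with
    | true =>
      simp only [if_true]
      rw [cuStrip]
      by_cases hq : (String.ofList [c] == s) = true
      · simpa [cuStepA, hq] using ih false s d
      · simpa [cuStepA, hq] using ih true s d
    | false =>
      simp only [Bool.false_eq_true, if_false]
      rw [cuStrip]
      by_cases hqu : (String.ofList [c] == "\"" || String.ofList [c] == "'") = true
      · simpa [cuStepA, hqu] using ih true (String.ofList [c]) d
      · by_cases ho : (String.ofList [c] == open_ch) = true
        · rcases eq_of_beq ho with rfl
          have hc : (String.ofList [c] == close_ch) = false := by simpa using h
          have := ih false s (d + 1)
          simp only [Bool.false_eq_true, if_false] at this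
          simp [cuStepA, hqu, hc, this, List.count_cons]
          push_cast
          ring
        · by_cases hc : (String.ofList [c] == close_ch) = true
          · rcases eq_of_beq hc with rfl
            have ho' : (String.ofList [c] == open_ch) = false := by simpa using ho
            have := ih false s (d - 1)
            simp only [Bool.false_eq_true, if_false] at this
            simp [cuStepA, hqu, ho', this, List.count_cons]
            push_cast
            ring
          · have := ih false s d
            simp only [Bool.false_eq_true, if_false] at this
            simp [cuStepA, hqu, ho, hc, this, List.count_cons]

-- ===== VERDICT (by name: the statement is the Claim_ definition above) =====
theorem count_unmatched_py_spec : Claim_equal_count_unmatched_py := by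
  intro line open_ch close_ch _ hpre
  unfold Spec_count_unmatched_py count_unmatched_py count_unmatched_py_alt
  simpa using cu_loop_eq open_ch close_ch hpre line.toList false "" 0
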